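-- pv_equiv track=rewrite | github.com/0d-fako/SemiColon-Assignment | PythonClass/classWorks/Jan-2025/sum_of_pos_and _neg.py | sum_of_pos_and_neg
-- ===== SOURCE A (Python) =====
-- def sum_of_pos_and_neg(numbers):
--     pos_count = 0
--     neg_count = 0
--     zero_count = 0
--     for i in numbers:
--         if i > 0:
--             pos_count += i
--         elif i < 0:
--             neg_count += i
--         else:
--             zero_count += i
--     return pos_count, neg_count, zero_count
-- ===== SOURCE B (Python) =====
-- def sum_of_pos_and_neg(numbers):
--     pos_count = sum(i for i in numbers if i > 0)
--     neg_count = sum(i for i in numbers if i < 0)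
--     zero_count = sum(i for i in numbers if not (i > 0 or i < 0))
--     return pos_count, neg_count, zero_count
-- ===== Notes on version B (the rewrite author's own statement) =====
-- stated objective: idiomatic
-- what changed: Replaces the single branching accumulator loop by three independent filtered sums (three scans, no mutable state, no if/elif/else), returned as a tuple.
import Mathlib
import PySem

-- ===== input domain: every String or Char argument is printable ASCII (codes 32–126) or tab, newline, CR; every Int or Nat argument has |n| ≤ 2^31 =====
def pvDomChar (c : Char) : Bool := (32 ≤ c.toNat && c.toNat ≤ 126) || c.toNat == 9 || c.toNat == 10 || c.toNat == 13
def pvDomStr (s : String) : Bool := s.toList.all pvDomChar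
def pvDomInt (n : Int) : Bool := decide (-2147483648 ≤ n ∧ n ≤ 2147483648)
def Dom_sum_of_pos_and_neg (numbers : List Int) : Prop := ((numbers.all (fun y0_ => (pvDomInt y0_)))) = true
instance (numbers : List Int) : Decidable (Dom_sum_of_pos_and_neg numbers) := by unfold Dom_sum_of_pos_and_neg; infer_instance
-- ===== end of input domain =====

-- B replaces A's single branching accumulator loop with three independent filtered sums (idiomatic; same cost).

-- ===== PORT A =====
-- one pass, three accumulators, if/elif/else — literal transliteration of A's loop
def sum_of_pos_and_neg (numbers : List Int) : Int × Int × Int :=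
  numbers.foldl
    (fun (st : Int × Int × Int) i =>
      let (pos_count, neg_count, zero_count) := st
      if i > 0 then (pos_count + i, neg_count, zero_count)
      else if i < 0 then (pos_count, neg_count + i, zero_count)
      else (pos_count, neg_count, zero_count + i))
    (0, 0, 0)

-- ===== PORT B =====
-- three filtered sums, as in Source B
def sum_of_pos_and_neg_alt (numbers : List Int) : Int × Int × Int :=
  ((numbers.filter (fun i => i > 0)).sum,
   (numbers.filter (fun i => i < 0)).sum,
   (numbers.filter (fun i => !(i > 0 || i < 0))).sum)

-- ===== PRECONDITION & SPEC =====
def Spec_sum_of_pos_and_neg (numbers : List Int) (out : Int × Int × Int) : Prop := out = sum_of_pos_and_neg_alt numbers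
instance (numbers : List Int) (out : Int × Int × Int) : Decidable (Spec_sum_of_pos_and_neg numbers out) := by unfold Spec_sum_of_pos_and_neg; infer_instance

-- ===== CLAIM (what is proved, stated in full; the proofs are below) =====
def Claim_equal_sum_of_pos_and_neg : Prop := ∀ (numbers : List Int), Dom_sum_of_pos_and_neg numbers → Spec_sum_of_pos_and_neg numbers (sum_of_pos_and_neg numbers)

-- ===== LEMMAS AND PROOFS =====
-- loop invariant: A's fold from any state adds B's three filtered sums componentwise
theorem sum_of_pos_and_neg_fold (numbers : List Int) (p n z : Int) :
    numbers.foldl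
      (fun (st : Int × Int × Int) i =>
        let (pos_count, neg_count, zero_count) := st
        if i > 0 then (pos_count + i, neg_count, zero_count)
        else if i < 0 then (pos_count, neg_count + i, zero_count)
        else (pos_count, neg_count, zero_count + i))
      (p, n, z)
    = (p + (numbers.filter (fun i => i > 0)).sum,
       n + (numbers.filter (fun i => i < 0)).sum,
       z + (numbers.filter (fun i => !(i > 0 || i < 0))).sum) := by
  induction numbers generalizing p n z with
  | nil => simp
  | cons a t ih =>
    simp only [List.foldl_cons, List.filter_cons]
    by_cases h1 : a > 0
    · have h2 : ¬ a < 0 := by omega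
      simp [h1, h2, ih, add_assoc]
    · by_cases h2 : a < 0
      · simp [h1, h2, ih, add_assoc]
      · simp [h1, h2, ih, add_assoc]

-- ===== VERDICT (by name: the statement is the Claim_ definition above) =====
theorem sum_of_pos_and_neg_spec : Claim_equal_sum_of_pos_and_neg := by
  intro numbers _
  show _ = _
  simp [sum_of_pos_and_neg, sum_of_pos_and_neg_alt, sum_of_pos_and_neg_fold]
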